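-- pv_equiv track=rewrite | github.com/2024-2-analitica-descriptiva/2024-2-LAB-01-programacion-basica-en-python-jfyusty | homework/pregunta_07.py | reduce_function
-- ===== SOURCE A (Python) =====
-- def reduce_function(mapped_data):
--     reduce_dict = {}    # Inicializa un diccionario vacío para almacenar los resultados reducidos.
--     for number, letter in mapped_data:  # Itera sobre cada tupla (número, letra) en la lista de datos mapeados.
--         if number in reduce_dict:    # Comprueba si el número ya existe en el diccionario.
--             reduce_dict[number].append(letter)  # Si el número existe, añade la letra a la lista existente de letras asociadas con ese número.
--         else:
--             reduce_dict[number] = [letter]  # Si el número no existe en el diccionario, crea una nueva entrada con el número como clave e inicializa el valor como una lista que contiene la letra.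
--     return reduce_dict  # Retorna el diccionario que contiene los números con sus respectivas listas de letras asociadas.
-- ===== SOURCE B (Python) =====
-- def reduce_function(mapped_data):
--     keys = list(dict.fromkeys(number for number, _ in mapped_data))
--     return {number: [letter for n, letter in mapped_data if n == number] for number in keys}
-- ===== Notes on version B (the rewrite author's own statement) =====
-- stated objective: alternative
-- what changed: Replaces the single streaming dict-building pass with an order-preserving dedup of the keys followed by a dict comprehension that collects each key's letters with an inner scan.
import Mathlib
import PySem

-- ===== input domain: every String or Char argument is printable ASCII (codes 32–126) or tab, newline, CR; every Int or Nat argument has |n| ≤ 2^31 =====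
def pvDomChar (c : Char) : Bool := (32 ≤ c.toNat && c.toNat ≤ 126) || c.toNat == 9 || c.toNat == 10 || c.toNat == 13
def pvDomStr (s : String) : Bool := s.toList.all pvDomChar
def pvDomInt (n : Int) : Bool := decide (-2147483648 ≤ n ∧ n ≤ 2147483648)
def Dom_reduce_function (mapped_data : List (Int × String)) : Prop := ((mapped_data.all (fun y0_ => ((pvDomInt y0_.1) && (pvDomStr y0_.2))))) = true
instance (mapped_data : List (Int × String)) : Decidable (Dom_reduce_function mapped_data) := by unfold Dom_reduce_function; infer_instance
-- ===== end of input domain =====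

-- B replaces A's single streaming dict-building pass by an ordered dedup of the keys plus a per-key scan; objective: alternative decomposition.

-- ===== PORT A =====
-- A builds a dict, appending each letter to its number's list (new numbers get a fresh one-element list), and returns the dict.
def reduce_function (mapped_data : List (Int × String)) : List (Int × List String) :=
  (mapped_data.foldl
    (fun reduce_dict p =>
      if reduce_dict.contains p.1 then
        reduce_dict.modify p.1 [] (fun xs => xs ++ [p.2])
      else
        reduce_dict.insert p.1 [p.2])
    (PySem.Dict.empty : PySem.Dict Int (List String))).items

-- ===== PORT B =====
-- B: keys = list(dict.fromkeys(...)), then a dict comprehension collecting each key's letters by an inner scan.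
def reduce_function_alt (mapped_data : List (Int × String)) : List (Int × List String) :=
  (PySem.List.dedup (mapped_data.map (·.1))).map
    (fun number => (number, (mapped_data.filter (fun p => p.1 == number)).map (·.2)))

-- ===== PRECONDITION & SPEC =====
def Spec_reduce_function (mapped_data : List (Int × String)) (out : List (Int × List String)) : Prop := out = reduce_function_alt mapped_data
instance (mapped_data : List (Int × String)) (out : List (Int × List String)) : Decidable (Spec_reduce_function mapped_data out) := by unfold Spec_reduce_function; infer_instance

-- ===== CLAIM (what is proved, stated in full; the proofs are below) =====
def Claim_equal_reduce_function : Prop := ∀ (mapped_data : List (Int × String)), Dom_reduce_function mapped_data → Spec_reduce_function mapped_data (reduce_function mapped_data)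

-- ===== LEMMAS AND PROOFS =====

-- A's if/else step is exactly Dict.modify with default []: when the key is absent, modify appends (k, [] ++ [v]) = insert k [v].
theorem reduce_step_eq_modify (d : PySem.Dict Int (List String)) (p : Int × String) :
    (if d.contains p.1 then d.modify p.1 [] (fun xs => xs ++ [p.2]) else d.insert p.1 [p.2])
      = d.modify p.1 [] (fun xs => xs ++ [p.2]) := by
  by_cases h : d.contains p.1
  · simp [h]
  · have hg : d.getD p.1 [] = [] := by
      simp [PySem.Dict.getD, (PySem.Dict.get?_eq_none_iff_contains d p.1).mpr (by simpa using h)]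
    simp [h, PySem.Dict.insert, PySem.Dict.modify, hg]

theorem reduce_fold_eq_modify (mapped_data : List (Int × String)) :
    mapped_data.foldl
      (fun reduce_dict p =>
        if reduce_dict.contains p.1 then
          reduce_dict.modify p.1 [] (fun xs => xs ++ [p.2])
        else
          reduce_dict.insert p.1 [p.2])
      (PySem.Dict.empty : PySem.Dict Int (List String))
      = mapped_data.foldl (fun d p => d.modify p.1 [] (fun xs => xs ++ [p.2])) PySem.Dict.empty := by
  apply List.foldl_ext
  intro d p _
  exact reduce_step_eq_modify d p

-- ===== VERDICT (by name: the statement is the Claim_ definition above) =====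
theorem reduce_function_spec : Claim_equal_reduce_function := by
  intro mapped_data _
  show reduce_function mapped_data = reduce_function_alt mapped_data
  unfold reduce_function reduce_function_alt
  rw [reduce_fold_eq_modify]
  rw [PySem.Dict.items_eq_map_keys _ (by
        simpa using PySem.Dict.nodup_keys_foldl_modify_key mapped_data (·.1) [] _ PySem.Dict.empty (by simp)) []]
  rw [PySem.Dict.keys_foldl_modify_key]
  simp [PySem.List.dedup_eq_ofList, PySem.Dict.getD_foldl_modify_append]
  rfl
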